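-- pv_equiv track=rewrite | github.com/ext-maru/ai-co | elders_guild/libs/incident_sage_process.py | _generate_prevention_recommendations
-- ===== SOURCE A (Python) =====
-- from typing import Dict, List, Any, Optional
--
-- def _generate_prevention_recommendations(frequent_causes: List[tuple]) -> List[str]:
--     """予防策の生成"""
--     recommendations = []
--
--     for cause, count in frequent_causes[:3]:
--         if "configuration" in cause.lower():
--             recommendations.append("Implement configuration validation checks")
--         elif "memory" in cause.lower():
--             recommendations.append("Add memory monitoring and alerts")
--         elif "timeout" in cause.lower():
--             recommendations.append("Review and adjust timeout settings")
--         else: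
--             recommendations.append(f"Investigate and address: {cause}")
--
--     return recommendations
-- ===== SOURCE B (Python) =====
-- def _generate_prevention_recommendations(frequent_causes):
--     top = frequent_causes[:3]
--     recs = [f"Investigate and address: {cause}" for cause, _ in top]
--     lows = [cause.lower() for cause, _ in top]
--     # overwrite passes in reverse priority: the last pass (configuration) wins
--     for kw, rec in [("timeout", "Review and adjust timeout settings"),
--                     ("memory", "Add memory monitoring and alerts"),
--                     ("configuration", "Implement configuration validation checks")]:
--         for i, low in enumerate(lows):
--             if kw in low:
--                 recs[i] = rec
--     return recs
-- ===== Notes on version B (the rewrite author's own statement) =====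
-- stated objective: alternative
-- what changed: Replaces A's per-element if/elif ladder with staged whole-list passes: fill all slots with the default string, then run three overwrite passes over the list in reverse priority order (timeout, memory, configuration) so the last matching pass wins.
import Mathlib
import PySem

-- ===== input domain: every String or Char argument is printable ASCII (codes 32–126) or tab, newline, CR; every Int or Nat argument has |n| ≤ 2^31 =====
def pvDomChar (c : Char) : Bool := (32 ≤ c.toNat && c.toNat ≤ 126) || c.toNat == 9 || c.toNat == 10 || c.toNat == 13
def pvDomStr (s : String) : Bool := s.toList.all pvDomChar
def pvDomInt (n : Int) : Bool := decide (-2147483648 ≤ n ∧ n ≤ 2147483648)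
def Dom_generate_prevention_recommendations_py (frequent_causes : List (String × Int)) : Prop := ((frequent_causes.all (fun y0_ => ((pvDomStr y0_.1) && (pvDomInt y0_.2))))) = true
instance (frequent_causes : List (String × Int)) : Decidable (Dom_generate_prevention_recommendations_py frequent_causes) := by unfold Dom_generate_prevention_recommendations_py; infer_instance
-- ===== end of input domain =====

-- B replaces A's per-element if/elif ladder with staged overwrite passes (defaults first, then one whole-list pass per keyword in reverse priority order); alternative decomposition, same output.


-- ===== PORT A =====
def generate_prevention_recommendations_py (frequent_causes : List (String × Int)) : List String :=
  (PySem.List.slice frequent_causes none (some 3)).foldl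
    (fun recommendations p =>
      if PySem.Str.isIn "configuration" (PySem.Str.lower p.1) then
        recommendations ++ ["Implement configuration validation checks"]
      else if PySem.Str.isIn "memory" (PySem.Str.lower p.1) then
        recommendations ++ ["Add memory monitoring and alerts"]
      else if PySem.Str.isIn "timeout" (PySem.Str.lower p.1) then
        recommendations ++ ["Review and adjust timeout settings"]
      else
        recommendations ++ ["Investigate and address: " ++ p.1]) []

-- ===== PORT B =====
-- B: default slots, then one overwrite pass per keyword (reverse priority order);
-- the inner Python loop 'for i, low in enumerate(lows): if kw in low: recs[i] = rec'
-- is transcribed as a positionwise zipWith of recs with the fixed lows list.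
def generate_prevention_recommendations_py_alt (frequent_causes : List (String × Int)) : List String :=
  let top := PySem.List.slice frequent_causes none (some 3)
  let recs := top.map (fun p => "Investigate and address: " ++ p.1)
  let lows := top.map (fun p => PySem.Str.lower p.1)
  [("timeout", "Review and adjust timeout settings"),
   ("memory", "Add memory monitoring and alerts"),
   ("configuration", "Implement configuration validation checks")].foldl
    (fun recs kv =>
      List.zipWith (fun r low => if PySem.Str.isIn kv.1 low then kv.2 else r) recs lows)
    recs

-- ===== PRECONDITION & SPEC =====
def Spec_generate_prevention_recommendations_py (frequent_causes : List (String × Int)) (out : List String) : Prop := out = generate_prevention_recommendations_py_alt frequent_causes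
instance (frequent_causes : List (String × Int)) (out : List String) : Decidable (Spec_generate_prevention_recommendations_py frequent_causes out) := by unfold Spec_generate_prevention_recommendations_py; infer_instance

-- ===== CLAIM (what is proved, stated in full; the proofs are below) =====
def Claim_equal_generate_prevention_recommendations_py : Prop := ∀ (frequent_causes : List (String × Int)), Dom_generate_prevention_recommendations_py frequent_causes → Spec_generate_prevention_recommendations_py frequent_causes (generate_prevention_recommendations_py frequent_causes)

-- ===== LEMMAS AND PROOFS =====

theorem pvZipWith_map_map {α β γ δ : Type} (h : β → γ → δ) (a : α → β) (b : α → γ) (l : List α) :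
    List.zipWith h (l.map a) (l.map b) = l.map (fun x => h (a x) (b x)) := by
  induction l with
  | nil => rfl
  | cons x t ih => simp [ih]

-- A's fold-with-append equals a map of the per-element ladder.
theorem pvFoldl_map (l : List (String × Int)) (acc : List String) :
    (l.foldl
      (fun recommendations p =>
        if PySem.Str.isIn "configuration" (PySem.Str.lower p.1) then
          recommendations ++ ["Implement configuration validation checks"]
        else if PySem.Str.isIn "memory" (PySem.Str.lower p.1) then
          recommendations ++ ["Add memory monitoring and alerts"]
        else if PySem.Str.isIn "timeout" (PySem.Str.lower p.1) then
          recommendations ++ ["Review and adjust timeout settings"]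
        else
          recommendations ++ ["Investigate and address: " ++ p.1]) acc) =
    acc ++ l.map (fun p =>
      if PySem.Str.isIn "configuration" (PySem.Str.lower p.1) then
        "Implement configuration validation checks"
      else if PySem.Str.isIn "memory" (PySem.Str.lower p.1) then
        "Add memory monitoring and alerts"
      else if PySem.Str.isIn "timeout" (PySem.Str.lower p.1) then
        "Review and adjust timeout settings"
      else "Investigate and address: " ++ p.1) := by
  induction l generalizing acc with
  | nil => simp
  | cons h t ih =>
    simp only [List.foldl_cons, List.map_cons]
    rw [ih]
    split_ifs <;> simp

-- B's three staged overwrite passes collapse to the same per-element ladder map.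
theorem pvAlt_map (l : List (String × Int)) :
    generate_prevention_recommendations_py_alt l =
    (PySem.List.slice l none (some 3)).map (fun p =>
      if PySem.Str.isIn "configuration" (PySem.Str.lower p.1) then
        "Implement configuration validation checks"
      else if PySem.Str.isIn "memory" (PySem.Str.lower p.1) then
        "Add memory monitoring and alerts"
      else if PySem.Str.isIn "timeout" (PySem.Str.lower p.1) then
        "Review and adjust timeout settings"
      else "Investigate and address: " ++ p.1) := by
  unfold generate_prevention_recommendations_py_alt
  simp only [List.foldl_cons, List.foldl_nil]
  rw [pvZipWith_map_map, pvZipWith_map_map, pvZipWith_map_map]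

-- ===== VERDICT (by name: the statement is the Claim_ definition above) =====
theorem generate_prevention_recommendations_py_spec : Claim_equal_generate_prevention_recommendations_py := by
  intro fc _
  unfold Spec_generate_prevention_recommendations_py
  rw [pvAlt_map, generate_prevention_recommendations_py, pvFoldl_map]
  simp
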